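-- pv_equiv track=rewrite | github.com/Esya-rae/AoC2024 | 21/A.py | dir_presses
-- ===== SOURCE A (Python) =====
-- def dir_presses(code):
--     seq = ''
--     prev = 'A'
--     d = {'<': 0, '>': 2, 'v': 1}
--     for i in range(0, len(code)):
--         cur = code[i]
--         if cur == prev:
--             seq += 'A'
--         elif cur in '^A' and prev in '^A':
--             if prev == 'A':
--                 seq += '<A'
--             else:
--                 seq += '>A'
--         elif prev in '^A':
--             if prev == 'A':
--                 seq += 'v' + '<' * (d['>'] - d[cur]) + 'A'
--             else:
--                 if cur == '>':
--                     seq += 'v>A'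
--                 elif cur == '<':
--                     seq += 'v<A'
--                 else:
--                     seq += 'vA'
--         elif cur in '^A':
--             if cur == 'A':
--                 seq += '>' * (d['>'] - d[prev]) + '^' + 'A'
--             else:
--                 if prev == '>':
--                     seq += '<^A'
--                 elif prev == '<':
--                     seq += '>^A'
--                 else:
--                     seq += '^A'
--         else:
--             if d[cur] > d[prev]:
--                 seq += '>' * (d[cur] - d[prev]) + 'A'
--             else:
--                 seq += '<' * (d[prev] - d[cur]) + 'A'
--         prev = cur
--
--     return seq
-- ===== SOURCE B (Python) =====
-- def dir_presses(code):
--     pos = {'^': (0, 1), 'A': (0, 2), '<': (1, 0), 'v': (1, 1), '>': (1, 2)}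
--     out = []
--     prev = 'A'
--     for cur in code:
--         if cur == prev:
--             out.append('A')
--             continue
--         pr, pc = pos[prev]
--         cr, cc = pos[cur]
--         dr, dc = cr - pr, cc - pc
--         vert = 'v' * dr if dr > 0 else '^' * (-dr)
--         horiz = '>' * dc if dc > 0 else '<' * (-dc)
--         out.append((vert + horiz if dr > 0 else horiz + vert) + 'A')
--         prev = cur
--     return ''.join(out)
-- ===== Notes on version B (the rewrite author's own statement) =====
-- stated objective: simpler
-- what changed: Replaces A's nested five-way case analysis and ad-hoc dict of columns by one geometric computation: each key gets a (row,col) coordinate and the chunk is the vertical and horizontal runs from the delta, ordered vertical-first when descending and horizontal-first otherwise.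
-- outside the precondition, e.g. on dir_presses('^x'): A returns '<AvA', B raises KeyError
import Mathlib
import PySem

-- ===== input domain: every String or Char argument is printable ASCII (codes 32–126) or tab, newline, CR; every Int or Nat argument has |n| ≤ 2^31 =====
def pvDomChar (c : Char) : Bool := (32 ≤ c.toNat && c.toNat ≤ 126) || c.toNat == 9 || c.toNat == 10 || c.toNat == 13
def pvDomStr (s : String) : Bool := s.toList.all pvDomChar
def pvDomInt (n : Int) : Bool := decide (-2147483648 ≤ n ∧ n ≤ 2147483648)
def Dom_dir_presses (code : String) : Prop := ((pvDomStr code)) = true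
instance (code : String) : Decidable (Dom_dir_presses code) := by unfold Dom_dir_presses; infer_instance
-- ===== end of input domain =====

-- B replaces A's nested case analysis by one geometric move computation on (row,col) key
-- coordinates (objective: simpler); equivalence is claimed on codes made of keypad characters only.

-- ===== PORT A =====

-- '<c>' * n  (Python: negative n gives the empty string; exact via toNat)
def pvRep (c : Char) (n : Int) : List Char := List.replicate n.toNat c

-- d = {'<': 0, '>': 2, 'v': 1}; d[c] is a KeyError lookup — Pre_ excludes codes that reach a
-- missing key, so the total getD form is exact on Pre_.
def pvD : PySem.Dict Char Int := PySem.Dict.ofList [('<', 0), ('>', 2), ('v', 1)]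

def pvDGet (c : Char) : Int := PySem.Dict.getD pvD c 0

-- the body of A's loop: the characters appended to seq for one (prev, cur) pair
def pvStepA (prev cur : Char) : List Char :=
  if cur == prev then ['A']
  else if (PySem.Chars.isIn [cur] ['^', 'A'] && PySem.Chars.isIn [prev] ['^', 'A']) then
    if prev == 'A' then ['<', 'A'] else ['>', 'A']
  else if PySem.Chars.isIn [prev] ['^', 'A'] then
    if prev == 'A' then 'v' :: pvRep '<' (pvDGet '>' - pvDGet cur) ++ ['A']
    else if cur == '>' then ['v', '>', 'A']
    else if cur == '<' then ['v', '<', 'A']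
    else ['v', 'A']
  else if PySem.Chars.isIn [cur] ['^', 'A'] then
    if cur == 'A' then pvRep '>' (pvDGet '>' - pvDGet prev) ++ ['^', 'A']
    else if prev == '>' then ['<', '^', 'A']
    else if prev == '<' then ['>', '^', 'A']
    else ['^', 'A']
  else
    if pvDGet cur > pvDGet prev then pvRep '>' (pvDGet cur - pvDGet prev) ++ ['A']
    else pvRep '<' (pvDGet prev - pvDGet cur) ++ ['A']

-- for i in range(0, len(code)): cur = code[i]; seq += …; prev = cur
def pvLoopA : List Char → Char → List Char → List Char
  | [], _, seq => seq
  | c :: cs, prev, seq => pvLoopA cs c (seq ++ pvStepA prev c)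

def dir_presses (code : String) : String := String.ofList (pvLoopA code.toList 'A' [])

-- ===== PORT B =====

-- pos = {'^': (0,1), 'A': (0,2), '<': (1,0), 'v': (1,1), '>': (1,2)}; KeyError excluded by Pre_
def pvPos : PySem.Dict Char (Int × Int) :=
  PySem.Dict.ofList [('^', (0, 1)), ('A', (0, 2)), ('<', (1, 0)), ('v', (1, 1)), ('>', (1, 2))]

-- the chunk appended for one move (Source B's loop body after the cur == prev short-circuit)
def pvStepB (prev cur : Char) : List Char :=
  let p := PySem.Dict.getD pvPos prev (0, 0)
  let c := PySem.Dict.getD pvPos cur (0, 0)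
  let dr : Int := c.1 - p.1
  let dc : Int := c.2 - p.2
  let vert := if dr > 0 then pvRep 'v' dr else pvRep '^' (-dr)
  let horiz := if dc > 0 then pvRep '>' dc else pvRep '<' (-dc)
  (if dr > 0 then vert ++ horiz else horiz ++ vert) ++ ['A']

-- out is the list of chunks; ''.join(out) at the end
def pvLoopB : List Char → Char → List (List Char) → List (List Char)
  | [], _, out => out
  | c :: cs, prev, out =>
    if c == prev then pvLoopB cs prev (out ++ [['A']])
    else pvLoopB cs c (out ++ [pvStepB prev c])

def dir_presses_alt (code : String) : String := String.ofList (pvLoopB code.toList 'A' []).flatten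

-- ===== PRECONDITION & SPEC =====
-- Pre_ excludes codes containing a character outside the keypad '^Av<>': A raises KeyError on
-- almost all of them, except that a stray character directly after '^' is silently treated as
-- 'v' by A's catch-all branch (an artefact of its case analysis) — B raises KeyError there too.
def Pre_dir_presses (code : String) : Prop :=
  (code.toList.all (fun c => c ∈ ['^', 'A', '<', 'v', '>'])) = true
instance (code : String) : Decidable (Pre_dir_presses code) := by
  unfold Pre_dir_presses; infer_instance

def pvWitness_dir_presses : String := "v<A^>"

def Spec_dir_presses (code : String) (out : String) : Prop := out = dir_presses_alt code
instance (code : String) (out : String) : Decidable (Spec_dir_presses code out) := by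
  unfold Spec_dir_presses; infer_instance

-- ===== CLAIM (what is proved, stated in full; the proofs are below) =====
def Claim_equal_dir_presses : Prop :=
  ∀ (code : String), Dom_dir_presses code → Pre_dir_presses code →
    Spec_dir_presses code (dir_presses code)

-- ===== LEMMAS AND PROOFS =====

-- one step of A equals one chunk of B, for any two keypad characters (equal ones included:
-- B's geometric chunk degenerates to ['A'] when the move is zero)
theorem pvStep_eq (prev cur : Char)
    (hp : prev ∈ ['^', 'A', '<', 'v', '>']) (hc : cur ∈ ['^', 'A', '<', 'v', '>']) :
    pvStepA prev cur = pvStepB prev cur := by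
  fin_cases hp <;> fin_cases hc <;> decide

theorem pvLoop_eq (cs : List Char) : ∀ (prev : Char) (accA : List Char)
    (accB : List (List Char)),
    (∀ c ∈ cs, c ∈ ['^', 'A', '<', 'v', '>']) → prev ∈ ['^', 'A', '<', 'v', '>'] →
    accA = accB.flatten →
    pvLoopA cs prev accA = (pvLoopB cs prev accB).flatten := by
  induction cs with
  | nil => intro _ _ _ _ _ h; simpa [pvLoopA, pvLoopB] using h
  | cons c cs ih =>
    intro prev accA accB hall hprev hacc
    have hcv : c ∈ ['^', 'A', '<', 'v', '>'] := hall c (List.mem_cons_self ..)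
    have hrest : ∀ x ∈ cs, x ∈ ['^', 'A', '<', 'v', '>'] :=
      fun x hx => hall x (List.mem_cons_of_mem _ hx)
    simp only [pvLoopA, pvLoopB]
    by_cases h : c = prev
    · subst h
      rw [if_pos (by simp)]
      refine ih c _ _ hrest hcv ?_
      have : pvStepA c c = ['A'] := by simp [pvStepA]
      simp [hacc, this]
    · rw [if_neg (by simpa using h)]
      refine ih c _ _ hrest hcv ?_
      simp [hacc, pvStep_eq prev c hprev hcv]

-- ===== VERDICT (by name: the statement is the Claim_ definition above) =====
theorem dir_presses_spec : Claim_equal_dir_presses := by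
  intro code _ hpre
  unfold Spec_dir_presses dir_presses dir_presses_alt
  have hall : ∀ c ∈ code.toList, c ∈ ['^', 'A', '<', 'v', '>'] := by
    simpa [Pre_dir_presses, List.all_eq_true] using hpre
  rw [pvLoop_eq code.toList 'A' [] [] hall (by decide) rfl]
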